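-- pv_equiv track=rewrite | github.com/alexispapayan/NN_remeshing | Triangulation_with_points.py | linked_via_inner_point
-- ===== SOURCE A (Python) =====
-- def linked_via_inner_point(vtx1,vtx2,edges_to_visit,set_of_open_vertices):
--
--     vtx_set=set([vtx for edges in edges_to_visit  for vtx in edges])
--
--     if vtx1 not in vtx_set and vtx2 not in vtx_set:
--         return True
-- #    if vtx1 in vtx_set and vtx2 not in vtx_set:
-- #        return True
-- #    if vtx2 in vtx_set and vtx1 not in vtx_set:
-- #        return True
-- #    if vtx2 not in set_of_open_vertices:
--         return True
--     for edges in edges_to_visit: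
--         for index,vtx in enumerate(edges):
--             if edges[index]==vtx1:
--                 adjacent_point=edges[(index+1)%2]
--                 for edges in edges_to_visit:
--                     for index,vertices in enumerate(edges):
--                         if edges[index]==adjacent_point and edges[(index+1)%2]==vtx2:
--                             return True
--     return False
-- ===== SOURCE B (Python) =====
-- def linked_via_inner_point(vtx1, vtx2, edges_to_visit, set_of_open_vertices):
--     n1, n2, seen = set(), set(), False
--     for a, b in edges_to_visit:
--         if vtx1 in (a, b) or vtx2 in (a, b):
--             seen = True
--         if a == vtx1:
--             n1.add(b)
--         if b == vtx1:
--             n1.add(a)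
--         if a == vtx2:
--             n2.add(b)
--         if b == vtx2:
--             n2.add(a)
--     if not seen:
--         return True
--     return not n1.isdisjoint(n2)
-- ===== Notes on version B (the rewrite author's own statement) =====
-- stated objective: alternative
-- what changed: Replaces A's nested rescans of the edge list (for every occurrence of vtx1, a full scan for an edge joining the adjacent point to vtx2) by a single pass that builds the neighbour sets of vtx1 and vtx2 and then tests them for intersection.
import Mathlib
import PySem

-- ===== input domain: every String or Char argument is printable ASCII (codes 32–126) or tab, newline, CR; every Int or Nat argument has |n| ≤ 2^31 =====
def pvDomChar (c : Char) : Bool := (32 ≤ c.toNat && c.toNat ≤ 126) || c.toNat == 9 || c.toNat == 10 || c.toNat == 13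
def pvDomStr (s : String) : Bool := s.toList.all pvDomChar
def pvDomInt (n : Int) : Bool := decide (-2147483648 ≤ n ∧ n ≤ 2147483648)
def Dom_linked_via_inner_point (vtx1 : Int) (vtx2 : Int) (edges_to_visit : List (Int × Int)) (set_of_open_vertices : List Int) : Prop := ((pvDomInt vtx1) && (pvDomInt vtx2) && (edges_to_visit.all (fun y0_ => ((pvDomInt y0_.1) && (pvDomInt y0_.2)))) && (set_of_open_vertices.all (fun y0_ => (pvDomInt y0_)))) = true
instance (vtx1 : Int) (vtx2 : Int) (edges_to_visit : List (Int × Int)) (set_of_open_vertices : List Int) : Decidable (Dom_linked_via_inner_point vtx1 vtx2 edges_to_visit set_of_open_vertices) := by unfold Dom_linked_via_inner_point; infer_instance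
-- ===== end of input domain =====

-- B replaces A's nested rescans of the edge list by a single pass that builds the neighbour
-- sets of vtx1 and vtx2 and tests them for intersection (objective: alternative).

-- ===== PORT A =====
-- the innermost double loop: 'for edges in edges_to_visit: for index,vertices in enumerate(edges): if …: return True'
def pvInnerScanA (E : List (Int × Int)) (adjacent vtx2 : Int) : Bool :=
  E.any (fun f => (f.1 == adjacent && f.2 == vtx2) || (f.2 == adjacent && f.1 == vtx2))

-- outer 'for edges in edges_to_visit: for index,vtx in enumerate(edges): …'.
-- Python quirk kept faithfully: the inner 'for edges in …' rebinds the variable `edges`, so after the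
-- inner loop runs (it runs iff edges[0]==vtx1 fired), the index-1 test reads the LAST edge of the list.
def pvOuterLoopA (vtx1 vtx2 : Int) (E : List (Int × Int)) : List (Int × Int) → Bool
  | [] => false
  | e :: rest =>
    if e.1 == vtx1 then
      if pvInnerScanA E e.2 vtx2 then true
      else
        let edges := E.getLastD e   -- `edges` was clobbered by the inner loop (E is nonempty here)
        if edges.2 == vtx1 then
          if pvInnerScanA E edges.1 vtx2 then true else pvOuterLoopA vtx1 vtx2 E rest
        else pvOuterLoopA vtx1 vtx2 E rest
    else
      if e.2 == vtx1 then
        if pvInnerScanA E e.1 vtx2 then true else pvOuterLoopA vtx1 vtx2 E rest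
      else pvOuterLoopA vtx1 vtx2 E rest

def linked_via_inner_point (vtx1 : Int) (vtx2 : Int) (edges_to_visit : List (Int × Int)) (set_of_open_vertices : List Int) : Bool :=
  let vtx_set : PySem.Set Int := PySem.Set.ofList (edges_to_visit.flatMap (fun e => [e.1, e.2]))
  if !(PySem.Set.contains vtx_set vtx1) && !(PySem.Set.contains vtx_set vtx2) then true
  else pvOuterLoopA vtx1 vtx2 edges_to_visit edges_to_visit

-- ===== PORT B =====
-- one pass of the loop body of Source B
def pvAltStep (vtx1 vtx2 : Int) (st : PySem.Set Int × PySem.Set Int × Bool) (e : Int × Int) :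
    PySem.Set Int × PySem.Set Int × Bool :=
  let a := e.1
  let b := e.2
  let seen := if a == vtx1 || b == vtx1 || a == vtx2 || b == vtx2 then true else st.2.2
  let n1 := if a == vtx1 then PySem.Set.add st.1 b else st.1
  let n1 := if b == vtx1 then PySem.Set.add n1 a else n1
  let n2 := if a == vtx2 then PySem.Set.add st.2.1 b else st.2.1
  let n2 := if b == vtx2 then PySem.Set.add n2 a else n2
  (n1, n2, seen)

def linked_via_inner_point_alt (vtx1 : Int) (vtx2 : Int) (edges_to_visit : List (Int × Int)) (set_of_open_vertices : List Int) : Bool :=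
  let st := edges_to_visit.foldl (pvAltStep vtx1 vtx2) (PySem.Set.empty, PySem.Set.empty, false)
  if !st.2.2 then true
  else !(PySem.Set.isdisjoint st.1 st.2.1)

-- ===== PRECONDITION & SPEC =====
def Spec_linked_via_inner_point (vtx1 : Int) (vtx2 : Int) (edges_to_visit : List (Int × Int)) (set_of_open_vertices : List Int) (out : Bool) : Prop := out = linked_via_inner_point_alt vtx1 vtx2 edges_to_visit set_of_open_vertices
instance (vtx1 : Int) (vtx2 : Int) (edges_to_visit : List (Int × Int)) (set_of_open_vertices : List Int) (out : Bool) : Decidable (Spec_linked_via_inner_point vtx1 vtx2 edges_to_visit set_of_open_vertices out) := by unfold Spec_linked_via_inner_point; infer_instance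

-- ===== CLAIM (what is proved, stated in full; the proofs are below) =====
def Claim_equal_linked_via_inner_point : Prop := ∀ (vtx1 : Int) (vtx2 : Int) (edges_to_visit : List (Int × Int)) (set_of_open_vertices : List Int), Dom_linked_via_inner_point vtx1 vtx2 edges_to_visit set_of_open_vertices → Spec_linked_via_inner_point vtx1 vtx2 edges_to_visit set_of_open_vertices (linked_via_inner_point vtx1 vtx2 edges_to_visit set_of_open_vertices)

-- ===== LEMMAS AND PROOFS =====

-- "some edge of E joins x and m"
def pvNbr (E : List (Int × Int)) (x m : Int) : Prop :=
  ∃ f ∈ E, (f.1 = x ∧ f.2 = m) ∨ (f.2 = x ∧ f.1 = m)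

theorem pvNbr_cons (e : Int × Int) (rest : List (Int × Int)) (x m : Int) :
    pvNbr (e :: rest) x m ↔ ((e.1 = x ∧ e.2 = m) ∨ (e.2 = x ∧ e.1 = m)) ∨ pvNbr rest x m := by
  simp only [pvNbr, List.mem_cons]
  constructor
  · rintro ⟨f, rfl | hf, hor⟩
    · exact Or.inl hor
    · exact Or.inr ⟨f, hf, hor⟩
  · rintro (hor | ⟨f, hf, hor⟩)
    · exact ⟨e, Or.inl rfl, hor⟩
    · exact ⟨f, Or.inr hf, hor⟩

theorem pvGetLastD_mem {α : Type} (E : List α) (d : α) (h : E ≠ []) : E.getLastD d ∈ E := by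
  cases E with
  | nil => exact absurd rfl h
  | cons a l =>
    rw [List.getLastD_eq_getLast?, List.getLast?_eq_some_getLast (l := a :: l) (by simp)]
    exact List.getLast_mem (by simp)

theorem pvInnerScanA_iff (E : List (Int × Int)) (m v2 : Int) :
    pvInnerScanA E m v2 = true ↔ pvNbr E m v2 := by
  simp [pvInnerScanA, pvNbr, List.any_eq_true]

theorem pvOuterLoopA_iff (vtx1 vtx2 : Int) (E rest : List (Int × Int)) :
    pvOuterLoopA vtx1 vtx2 E rest = true ↔
      ∃ e ∈ rest,
        (e.1 = vtx1 ∧ pvNbr E e.2 vtx2) ∨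
          ((if e.1 = vtx1 then E.getLastD e else e).2 = vtx1 ∧
            pvNbr E (if e.1 = vtx1 then E.getLastD e else e).1 vtx2) := by
  induction rest with
  | nil => simp [pvOuterLoopA]
  | cons e rest ih =>
    simp only [List.mem_cons, exists_eq_or_imp]
    by_cases h1 : e.1 = vtx1
    · simp only [pvOuterLoopA, beq_iff_eq, h1, if_true]
      by_cases h2 : ((E.getLastD e).2 = vtx1)
      · simp only [h2, if_true, ← ih]
        by_cases s1 : pvInnerScanA E e.2 vtx2 = true <;>
          by_cases s2 : pvInnerScanA E (E.getLastD e).1 vtx2 = true <;>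
          simp_all [pvInnerScanA_iff]
      · simp only [h2, if_false, ← ih]
        by_cases s1 : pvInnerScanA E e.2 vtx2 = true <;>
          simp_all [pvInnerScanA_iff]
    · simp only [pvOuterLoopA, beq_iff_eq, h1, if_false]
      by_cases h2 : e.2 = vtx1
      · simp only [h2, if_true, ← ih]
        by_cases s1 : pvInnerScanA E e.1 vtx2 = true <;>
          simp_all [pvInnerScanA_iff]
      · simp only [h2, if_false, ← ih]
        simp_all

theorem pvStep_mem_n1 (v1 v2 : Int) (s1 s2 : PySem.Set Int) (sn : Bool) (e : Int × Int) (m : Int) :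
    m ∈ (pvAltStep v1 v2 (s1, s2, sn) e).1 ↔
      m ∈ s1 ∨ (e.1 = v1 ∧ e.2 = m) ∨ (e.2 = v1 ∧ e.1 = m) := by
  simp only [pvAltStep, beq_iff_eq]
  split_ifs with ha hb hb <;> simp [PySem.Set.mem_add, ha, hb, eq_comm]

theorem pvStep_mem_n2 (v1 v2 : Int) (s1 s2 : PySem.Set Int) (sn : Bool) (e : Int × Int) (m : Int) :
    m ∈ (pvAltStep v1 v2 (s1, s2, sn) e).2.1 ↔
      m ∈ s2 ∨ (e.1 = v2 ∧ e.2 = m) ∨ (e.2 = v2 ∧ e.1 = m) := by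
  simp only [pvAltStep, beq_iff_eq]
  split_ifs with ha hb hb <;> simp [PySem.Set.mem_add, ha, hb, eq_comm]

theorem pvFold_n1 (v1 v2 : Int) (E : List (Int × Int)) :
    ∀ (s1 s2 : PySem.Set Int) (sn : Bool) (m : Int),
      m ∈ (E.foldl (pvAltStep v1 v2) (s1, s2, sn)).1 ↔ m ∈ s1 ∨ pvNbr E v1 m := by
  induction E with
  | nil => intro s1 s2 sn m; simp [pvNbr]
  | cons e rest ih =>
    intro s1 s2 sn m
    rw [List.foldl_cons, pvNbr_cons]
    have hstep : pvAltStep v1 v2 (s1, s2, sn) e =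
        ((pvAltStep v1 v2 (s1, s2, sn) e).1, (pvAltStep v1 v2 (s1, s2, sn) e).2.1,
          (pvAltStep v1 v2 (s1, s2, sn) e).2.2) := rfl
    rw [hstep, ih, pvStep_mem_n1]
    tauto

theorem pvFold_n2 (v1 v2 : Int) (E : List (Int × Int)) :
    ∀ (s1 s2 : PySem.Set Int) (sn : Bool) (m : Int),
      m ∈ (E.foldl (pvAltStep v1 v2) (s1, s2, sn)).2.1 ↔ m ∈ s2 ∨ pvNbr E v2 m := by
  induction E with
  | nil => intro s1 s2 sn m; simp [pvNbr]
  | cons e rest ih =>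
    intro s1 s2 sn m
    rw [List.foldl_cons, pvNbr_cons]
    have hstep : pvAltStep v1 v2 (s1, s2, sn) e =
        ((pvAltStep v1 v2 (s1, s2, sn) e).1, (pvAltStep v1 v2 (s1, s2, sn) e).2.1,
          (pvAltStep v1 v2 (s1, s2, sn) e).2.2) := rfl
    rw [hstep, ih, pvStep_mem_n2]
    tauto

theorem pvFold_seen (v1 v2 : Int) (E : List (Int × Int)) :
    ∀ (s1 s2 : PySem.Set Int) (sn : Bool),
      (E.foldl (pvAltStep v1 v2) (s1, s2, sn)).2.2 = true ↔
        sn = true ∨ ∃ e ∈ E, e.1 = v1 ∨ e.2 = v1 ∨ e.1 = v2 ∨ e.2 = v2 := by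
  induction E with
  | nil => intro s1 s2 sn; simp
  | cons e rest ih =>
    intro s1 s2 sn
    rw [List.foldl_cons]
    have hstep : pvAltStep v1 v2 (s1, s2, sn) e =
        ((pvAltStep v1 v2 (s1, s2, sn) e).1, (pvAltStep v1 v2 (s1, s2, sn) e).2.1,
          (pvAltStep v1 v2 (s1, s2, sn) e).2.2) := rfl
    rw [hstep, ih]
    have hseen : (pvAltStep v1 v2 (s1, s2, sn) e).2.2 =
        (if e.1 = v1 ∨ e.2 = v1 ∨ e.1 = v2 ∨ e.2 = v2 then true else sn) := by
      simp only [pvAltStep, beq_iff_eq, Bool.or_eq_true]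
      split_ifs <;> simp_all
    rw [hseen]
    simp only [List.mem_cons, exists_eq_or_imp]
    split_ifs with h <;> simp [h]

-- semantic core: the (clobber-afflicted) outer loop of A decides exactly "N(vtx1) ∩ N(vtx2) ≠ ∅"
theorem pvOuter_eq_inter (vtx1 vtx2 : Int) (E : List (Int × Int)) :
    pvOuterLoopA vtx1 vtx2 E E = true ↔ ∃ m, pvNbr E vtx1 m ∧ pvNbr E m vtx2 := by
  rw [pvOuterLoopA_iff]
  constructor
  · rintro ⟨e, he, ⟨h1, hs⟩ | ⟨h2, hs⟩⟩
    · exact ⟨e.2, ⟨e, he, Or.inl ⟨h1, rfl⟩⟩, hs⟩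
    · by_cases h1 : e.1 = vtx1
      · rw [if_pos h1] at h2 hs
        have hg : E.getLastD e ∈ E := pvGetLastD_mem E e (by rintro rfl; simp at he)
        exact ⟨(E.getLastD e).1, ⟨E.getLastD e, hg, Or.inr ⟨h2, rfl⟩⟩, hs⟩
      · rw [if_neg h1] at h2 hs
        exact ⟨e.1, ⟨e, he, Or.inr ⟨h2, rfl⟩⟩, hs⟩
  · rintro ⟨m, ⟨f, hf, ⟨ha, hb⟩ | ⟨hb, ha⟩⟩, hs⟩
    · exact ⟨f, hf, Or.inl ⟨ha, hb ▸ hs⟩⟩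
    · by_cases h1 : f.1 = vtx1
      · exact ⟨f, hf, Or.inl ⟨h1, by rw [hb, ← h1, ha]; exact hs⟩⟩
      · exact ⟨f, hf, Or.inr ⟨by rw [if_neg h1]; exact hb, by rw [if_neg h1, ha]; exact hs⟩⟩

-- the guard of A ("both vertices absent from the edge set") equals the guard of B ("not seen")
theorem pvGuard_iff (vtx1 vtx2 : Int) (E : List (Int × Int)) :
    ((!(PySem.Set.contains (PySem.Set.ofList (E.flatMap (fun e => [e.1, e.2]))) vtx1) &&
      !(PySem.Set.contains (PySem.Set.ofList (E.flatMap (fun e => [e.1, e.2]))) vtx2)) = true) ↔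
    ((!(E.foldl (pvAltStep vtx1 vtx2) (PySem.Set.empty, PySem.Set.empty, false)).2.2) = true) := by
  simp only [Bool.and_eq_true, Bool.not_eq_true', Bool.eq_false_iff, Ne, PySem.Set.contains_iff,
    PySem.Set.mem_ofList, List.mem_flatMap, pvFold_seen]
  simp only [List.mem_cons, List.not_mem_nil, or_false]
  constructor
  · rintro ⟨h1, h2⟩ (hfalse | ⟨e, he, hor⟩)
    · simp at hfalse
    · rcases hor with h | h | h | h
      · exact h1 ⟨e, he, Or.inl h.symm⟩
      · exact h1 ⟨e, he, Or.inr h.symm⟩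
      · exact h2 ⟨e, he, Or.inl h.symm⟩
      · exact h2 ⟨e, he, Or.inr h.symm⟩
  · intro h
    constructor
    · rintro ⟨e, he, h1 | h1⟩
      · exact h (Or.inr ⟨e, he, Or.inl h1.symm⟩)
      · exact h (Or.inr ⟨e, he, Or.inr (Or.inl h1.symm)⟩)
    · rintro ⟨e, he, h2 | h2⟩
      · exact h (Or.inr ⟨e, he, Or.inr (Or.inr (Or.inl h2.symm))⟩)
      · exact h (Or.inr ⟨e, he, Or.inr (Or.inr (Or.inr h2.symm))⟩)

theorem pvDisjoint_iff (vtx1 vtx2 : Int) (E : List (Int × Int)) :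
    (((!(PySem.Set.isdisjoint
        (E.foldl (pvAltStep vtx1 vtx2) (PySem.Set.empty, PySem.Set.empty, false)).1
        (E.foldl (pvAltStep vtx1 vtx2) (PySem.Set.empty, PySem.Set.empty, false)).2.1)) = true) ↔
      ∃ m, pvNbr E vtx1 m ∧ pvNbr E m vtx2) := by
  rw [Bool.not_eq_true']
  constructor
  · intro h
    have hd : ¬ (PySem.Set.isdisjoint
        (E.foldl (pvAltStep vtx1 vtx2) (PySem.Set.empty, PySem.Set.empty, false)).1
        (E.foldl (pvAltStep vtx1 vtx2) (PySem.Set.empty, PySem.Set.empty, false)).2.1 = true) := by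
      intro hc
      rw [h] at hc
      simp at hc
    rw [PySem.Set.isdisjoint_iff] at hd
    push Not at hd
    obtain ⟨m, h1, h2⟩ := hd
    rw [pvFold_n1] at h1
    rw [pvFold_n2] at h2
    have h1' := h1.resolve_left (by simp [PySem.Set.empty])
    have h2' := h2.resolve_left (by simp [PySem.Set.empty])
    obtain ⟨f, hf, hor⟩ := h2'
    exact ⟨m, h1', ⟨f, hf, by tauto⟩⟩
  · rintro ⟨m, h1, h2⟩
    have hd : ¬ (PySem.Set.isdisjoint
        (E.foldl (pvAltStep vtx1 vtx2) (PySem.Set.empty, PySem.Set.empty, false)).1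
        (E.foldl (pvAltStep vtx1 vtx2) (PySem.Set.empty, PySem.Set.empty, false)).2.1 = true) := by
      rw [PySem.Set.isdisjoint_iff]
      push Not
      refine ⟨m, ?_, ?_⟩
      · rw [pvFold_n1]; exact Or.inr h1
      · rw [pvFold_n2]
        obtain ⟨f, hf, hor⟩ := h2
        exact Or.inr ⟨f, hf, by tauto⟩
    exact Bool.eq_false_iff.mpr hd

-- ===== VERDICT (by name: the statement is the Claim_ definition above) =====
theorem linked_via_inner_point_spec : Claim_equal_linked_via_inner_point := by
  intro vtx1 vtx2 E sov _
  unfold Spec_linked_via_inner_point linked_via_inner_point linked_via_inner_point_alt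
  simp only []
  by_cases hg : (!(PySem.Set.contains (PySem.Set.ofList (E.flatMap (fun e => [e.1, e.2]))) vtx1) &&
      !(PySem.Set.contains (PySem.Set.ofList (E.flatMap (fun e => [e.1, e.2]))) vtx2)) = true
  · rw [if_pos hg, if_pos ((pvGuard_iff vtx1 vtx2 E).mp hg)]
  · rw [if_neg hg, if_neg (fun h => hg ((pvGuard_iff vtx1 vtx2 E).mpr h))]
    rw [Bool.eq_iff_iff, pvOuter_eq_inter, pvDisjoint_iff]
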